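-- pv_equiv track=rewrite | github.com/Darkduv/Project-Euler | Project Euler/several problems/Problem_622.py | f
-- ===== SOURCE A (Python) =====
-- def f(n):
--     n //= 2
--     ll = list(range(2*n))
--     nb = 0
--     while True:
--         nb += 1
--         ok = True
--         for i in range(2*n):
--             a = ll[i]
--             if a < n:
--                 ll[i] *= 2
--             else:
--                 ll[i] = (a-n)*2+1
--             if ll[i] != i:
--                 ok = False
--         if ok:
--             break
--     return nb
-- ===== SOURCE B (Python) =====
-- def f(n):
--     # One full shuffle sends position i to 2*i mod m, where m = 2*(n//2) - 1,
--     # so the answer is the multiplicative order of 2 modulo m: track the single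
--     # value x = 2^nb mod m instead of simulating the whole deck.
--     m = 2 * (n // 2) - 1
--     if m < 2:
--         return 1
--     nb = 1
--     x = 2 % m
--     while x != 1:
--         x = (2 * x) % m
--         nb += 1
--     return nb
-- ===== Notes on version B (the rewrite author's own statement) =====
-- stated objective: faster
-- what changed: Instead of simulating the whole 2*(n//2)-card deck pass after pass until it returns to identity, B tracks a single residue x = 2^nb mod (2*(n//2)-1), i.e. computes the multiplicative order of 2 modulo 2*(n//2)-1.
import Mathlib
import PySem

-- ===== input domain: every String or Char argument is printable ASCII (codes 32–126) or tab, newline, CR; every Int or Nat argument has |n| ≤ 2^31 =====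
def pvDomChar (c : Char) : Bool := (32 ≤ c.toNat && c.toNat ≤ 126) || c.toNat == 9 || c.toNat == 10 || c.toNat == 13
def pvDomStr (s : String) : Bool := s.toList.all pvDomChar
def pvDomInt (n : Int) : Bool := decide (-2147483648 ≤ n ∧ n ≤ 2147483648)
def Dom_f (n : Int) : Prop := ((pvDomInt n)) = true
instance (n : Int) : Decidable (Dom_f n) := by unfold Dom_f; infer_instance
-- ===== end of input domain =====

-- B replaces the pass-by-pass simulation of the whole 2*(n//2)-card deck by tracking the single
-- residue x = 2^nb mod (2*(n//2)-1) (the multiplicative order of 2): an asymptotic speed-up.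

-- ===== PORT A =====
-- one pass of the while-body's inner for-loop: 'for i in range(2*n): ...'
-- (i is always a valid index of ll here, so pyGetD/pySetD are exact for ll[i] / ll[i] = v)
def fStep (h : Int) (ll : List Int) : List Int × Bool :=
  (PySem.List.pyRange 0 (2*h) 1).foldl
    (fun st i =>
      let a := PySem.List.pyGetD st.1 i 0
      let v := if a < h then a * 2 else (a - h) * 2 + 1
      (PySem.List.pySetD st.1 i v, if v ≠ i then false else st.2))
    (ll, true)

-- the 'while True' loop, totalized with fuel; in the Python the deck is back to identity after
-- at most 2*h - 2 passes (the multiplicative order of 2 mod 2*h-1), within the fuel given below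
def fLoop (h : Int) : Nat → List Int → Int → Int
  | 0, _, nb => nb
  | fuel + 1, ll, nb =>
      match fStep h ll with
      | (ll', ok) => if ok then nb + 1 else fLoop h fuel ll' (nb + 1)

-- body of f after the reassignment 'n //= 2' (h is the halved n)
def fCore (h : Int) : Int :=
  fLoop h ((2 * h).toNat + 1) (PySem.List.pyRange 0 (2 * h) 1) 0

def f (n : Int) : Int := fCore (PySem.Int.floordiv n 2)

-- ===== PORT B =====
-- the 'while x != 1' loop of Source B, totalized with fuel; in the Python it runs at most
-- m - 2 times (the multiplicative order of 2 mod m), within the fuel m + 1 given below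
def fAltLoop (m : Int) : Nat → Int → Int → Int
  | 0, _, nb => nb
  | fuel + 1, x, nb =>
      if x = 1 then nb else fAltLoop m fuel (PySem.Int.mod (2 * x) m) (nb + 1)

-- body of Source B once m = 2*(n//2) - 1 is computed
def fAltCore (h : Int) : Int :=
  let m := 2 * h - 1
  if m < 2 then 1
  else fAltLoop m (m + 1).toNat (PySem.Int.mod 2 m) 1

def f_alt (n : Int) : Int := fAltCore (PySem.Int.floordiv n 2)

-- ===== PRECONDITION & SPEC =====
def Spec_f (n : Int) (out : Int) : Prop := out = f_alt n
instance (n : Int) (out : Int) : Decidable (Spec_f n out) := by unfold Spec_f; infer_instance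

-- ===== CLAIM (what is proved, stated in full; the proofs are below) =====
def Claim_equal_f : Prop := ∀ (n : Int), Dom_f n → Spec_f n (f n)

-- ===== LEMMAS AND PROOFS =====

-- the deck whose card at position j is (x*j) mod m, with the last position m fixed;
-- A's deck after nb passes is deckFor m (2^nb mod m), B's residue then is 2^nb mod m
def deckFor (m x : Int) : List Int :=
  (PySem.List.pyRange 0 (m + 1) 1).map (fun j => if j = m then m else (x * j) % m)

-- 'll[k] = v' on a deck given pointwise by fn updates the function at k
lemma set_map_pyRange (N : Int) (fn : Int → Int) (k : Nat) (v : Int) :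
    ((PySem.List.pyRange 0 N 1).map fn).set k v
      = (PySem.List.pyRange 0 N 1).map (fun j => if j = (k : Int) then v else fn j) := by
  apply List.ext_getElem
  · simp
  · intro i h1 h2
    simp only [List.getElem_set, List.getElem_map]
    have hi : i < N.toNat := by simpa [PySem.List.length_pyRange_one] using (by simpa using h2)
    rw [PySem.List.getElem_pyRange_one]
    by_cases hik : k = i
    · subst hik; simp
    · have h0 : ¬ (0 + (i:Int) = (k:Int)) := by intro hc; apply hik; omega
      simp only [hik, if_false, h0]

-- the arithmetic heart: one Python shuffle of the card (x*j) % m is the card (2*x*j) % m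
lemma gval (h x j : Int) (h2 : 2 ≤ h) :
    (if (if j = 2 * h - 1 then 2 * h - 1 else (x * j) % (2 * h - 1)) < h
     then (if j = 2 * h - 1 then 2 * h - 1 else (x * j) % (2 * h - 1)) * 2
     else ((if j = 2 * h - 1 then 2 * h - 1 else (x * j) % (2 * h - 1)) - h) * 2 + 1)
      = (if j = 2 * h - 1 then 2 * h - 1 else ((2 * x) % (2 * h - 1) * j) % (2 * h - 1)) := by
  set m := 2 * h - 1 with hm
  have hmpos : 0 < m := by omega
  by_cases hj : j = m
  · simp [hj]; omega
  · simp only [hj, if_false]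
    set a := (x * j) % m with ha
    have ha0 : 0 ≤ a := Int.emod_nonneg _ (by omega)
    have ham : a < m := Int.emod_lt_of_pos _ hmpos
    have key : (2 * x) % m * j % m = (2 * a) % m := by
      rw [ha]
      conv_lhs => rw [Int.mul_emod, Int.emod_emod_of_dvd _ dvd_rfl, ← Int.mul_emod]
      rw [mul_assoc, Int.mul_emod 2 (x*j) m, Int.mul_emod 2 (x*j%m) m,
         Int.emod_emod_of_dvd _ dvd_rfl]
    rw [key]
    by_cases hah : a < h
    · rw [if_pos hah, Int.emod_eq_of_lt (by omega) (by omega)]; ring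
    · rw [if_neg hah, ← Int.sub_emod_right (2*a) m,
         Int.emod_eq_of_lt (by omega) (by omega)]
      omega

-- invariant of the inner for-loop: after the first K indices, the deck's first K positions
-- hold the shuffled cards and the ok-flag records whether all of them came out fixed
lemma step_main (h x : Int) (h2 : 2 ≤ h) :
    ∀ (K : Nat), (K : Int) ≤ 2 * h →
    (PySem.List.pyRange 0 (K : Int) 1).foldl
      (fun (st : List Int × Bool) i =>
        let a := PySem.List.pyGetD st.1 i 0
        let v := if a < h then a * 2 else (a - h) * 2 + 1
        (PySem.List.pySetD st.1 i v, if v ≠ i then false else st.2))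
      (deckFor (2*h-1) x, true)
    = ((PySem.List.pyRange 0 (2*h) 1).map
         (fun j => if j < (K : Int)
                   then (if j = 2*h-1 then 2*h-1 else ((2*x) % (2*h-1) * j) % (2*h-1))
                   else (if j = 2*h-1 then 2*h-1 else (x * j) % (2*h-1))),
       (PySem.List.pyRange 0 (K : Int) 1).all
         (fun j => (if j = 2*h-1 then 2*h-1 else ((2*x) % (2*h-1) * j) % (2*h-1)) == j)) := by
  intro K
  induction K with
  | zero =>
    intro _
    rw [Int.natCast_zero, PySem.List.pyRange_one_eq_nil le_rfl]
    simp only [List.foldl_nil, List.all_nil]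
    refine Prod.ext ?_ rfl
    show deckFor (2*h-1) x = _
    unfold deckFor
    rw [show (2*h-1) + 1 = 2*h by ring]
    apply List.map_congr_left
    intro j hj
    rw [PySem.List.mem_pyRange_one] at hj
    simp only [show ¬ (j < (0:Int)) by omega, if_false]
  | succ K ih =>
    intro hK1
    have hK : (K : Int) ≤ 2*h := by push_cast at hK1 ⊢; omega
    have hcast : ((K+1 : Nat) : Int) = (K : Int) + 1 := by push_cast; ring
    rw [hcast, PySem.List.pyRange_one_succ_right (by positivity), List.foldl_append, ih hK]
    simp only [List.foldl_cons, List.foldl_nil]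
    have hKlt : (K : Int) < 2*h := by push_cast at hK1; omega
    have hget : PySem.List.pyGetD ((PySem.List.pyRange 0 (2*h) 1).map
         (fun j => if j < (K : Int)
                   then (if j = 2*h-1 then 2*h-1 else ((2*x) % (2*h-1) * j) % (2*h-1))
                   else (if j = 2*h-1 then 2*h-1 else (x * j) % (2*h-1)))) (K : Int) 0
        = (if (K:Int) = 2*h-1 then 2*h-1 else (x * (K:Int)) % (2*h-1)) := by
      rw [PySem.List.pyGetD_map_pyRange_of_nonneg _ _ _ _ (by positivity) hKlt]
      simp
    rw [hget]
    rw [gval h x (K:Int) h2]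
    refine Prod.ext ?_ ?_
    · show PySem.List.pySetD _ _ _ = _
      rw [PySem.List.pySetD_natCast, set_map_pyRange]
      apply List.map_congr_left
      intro j hj
      rw [PySem.List.mem_pyRange_one] at hj
      by_cases hjK : j = (K : Int)
      · simp [hjK]
      · have h1 : (j < (K:Int) + 1) = (j < (K:Int)) := by
          apply propext; constructor <;> intro <;> omega
        simp only [hjK, if_false, h1]
    · show (if _ ≠ _ then false else _) = _
      simp only [List.all_append, List.all_cons, List.all_nil]
      by_cases hv : (if (K:Int) = 2*h-1 then 2*h-1
                     else ((2*x) % (2*h-1) * (K:Int)) % (2*h-1)) = (K:Int)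
      · simp [hv]
      · simp [hv]

-- the pass leaves every card fixed exactly when the tracked residue is 1 (look at position 1)
lemma all_iff (h x' : Int) (h2 : 2 ≤ h) (h0 : 0 ≤ x') (hm : x' < 2*h-1) :
    ((PySem.List.pyRange 0 (2*h) 1).all
      (fun j => (if j = 2*h-1 then 2*h-1 else (x'*j) % (2*h-1)) == j)) = decide (x' = 1) := by
  by_cases hx1 : x' = 1
  · subst hx1
    simp only [decide_true]
    rw [List.all_eq_true]
    intro j hj
    rw [PySem.List.mem_pyRange_one] at hj
    by_cases hjm : j = 2*h-1
    · simp [hjm]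
    · simp only [hjm, if_false, beq_iff_eq, one_mul]
      exact Int.emod_eq_of_lt (by omega) (by omega)
  · cases hall : ((PySem.List.pyRange 0 (2*h) 1).all
      (fun j => (if j = 2*h-1 then 2*h-1 else (x'*j) % (2*h-1)) == j)) with
    | false => simp [hx1]
    | true =>
      exfalso
      rw [List.all_eq_true] at hall
      have h1 := hall 1 (by rw [PySem.List.mem_pyRange_one]; omega)
      have hne : ¬ ((1:Int) = 2*h-1) := by omega
      simp only [hne, if_false, mul_one, beq_iff_eq] at h1
      rw [Int.emod_eq_of_lt h0 hm] at h1
      exact hx1 h1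

-- one full pass of A = one doubling step of B
lemma step_eq (h x : Int) (h2 : 2 ≤ h) :
    fStep h (deckFor (2*h-1) x)
      = (deckFor (2*h-1) ((2*x) % (2*h-1)), decide ((2*x) % (2*h-1) = 1)) := by
  have hK : (((2*h).toNat : Nat) : Int) = 2*h := by omega
  have hmain := step_main h x h2 (2*h).toNat (by omega)
  rw [hK] at hmain
  unfold fStep
  rw [hmain]
  have hx'0 : 0 ≤ (2*x) % (2*h-1) := Int.emod_nonneg _ (by omega)
  have hx'm : (2*x) % (2*h-1) < 2*h-1 := Int.emod_lt_of_pos _ (by omega)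
  refine Prod.ext ?_ (all_iff h _ h2 hx'0 hx'm)
  show _ = deckFor _ _
  unfold deckFor
  rw [show (2*h-1) + 1 = 2*h by ring]
  apply List.map_congr_left
  intro j hj
  rw [PySem.List.mem_pyRange_one] at hj
  simp only [show j < 2*h from hj.2, if_true]

-- the two loops advance in lockstep (A tests after its pass, B before its step)
lemma loop_eq (h : Int) (h2 : 2 ≤ h) :
    ∀ (F : Nat) (x nb : Int), 0 ≤ x → x < 2 * h - 1 →
      fLoop h (F + 1) (deckFor (2 * h - 1) x) nb
        = fAltLoop (2 * h - 1) F ((2 * x) % (2 * h - 1)) (nb + 1) := by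
  intro F
  induction F with
  | zero =>
    intro x nb _ _
    rw [fLoop, step_eq h x h2]
    by_cases hx1 : (2*x) % (2*h-1) = 1 <;> simp [fAltLoop, fLoop, hx1]
  | succ F ih =>
    intro x nb _ _
    rw [fLoop, step_eq h x h2]
    have hx'0 : 0 ≤ (2*x) % (2*h-1) := Int.emod_nonneg _ (by omega)
    have hx'm : (2*x) % (2*h-1) < 2*h-1 := Int.emod_lt_of_pos _ (by omega)
    by_cases hx1 : (2*x) % (2*h-1) = 1
    · simp [fAltLoop, hx1]
    · simp only [hx1, decide_false, Bool.false_eq_true, if_false]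
      rw [ih _ _ hx'0 hx'm]
      rw [fAltLoop]
      simp only [hx1, if_false]
      congr 1
      rw [PySem.Int.mod_eq_emod_of_pos (by omega : (0:Int) < 2*h-1)]

-- the initial deck list(range(2*n)) is the deck for residue 1
lemma deckFor_one (h : Int) :
    PySem.List.pyRange 0 (2 * h) 1 = deckFor (2 * h - 1) 1 := by
  unfold deckFor
  rw [show (2*h-1) + 1 = 2*h by ring]
  conv_lhs => rw [← List.map_id (PySem.List.pyRange 0 (2*h) 1)]
  apply List.map_congr_left
  intro j hj
  rw [PySem.List.mem_pyRange_one] at hj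
  by_cases hjm : j = 2*h-1
  · simp [hjm]
  · simp only [id, hjm, if_false, one_mul]
    exact (Int.emod_eq_of_lt (by omega) (by omega)).symm

lemma core_eq (h : Int) : fCore h = fAltCore h := by
  by_cases hh : 2 ≤ h
  · unfold fCore fAltCore
    rw [if_neg (by omega)]
    have hfuel : (2*h).toNat + 1 = (2*h-1+1).toNat + 1 := by omega
    rw [hfuel, deckFor_one h, loop_eq h hh _ 1 0 (by omega) (by omega),
       show (2*1 : Int) % (2*h-1) = PySem.Int.mod 2 (2*h-1) from by
         rw [PySem.Int.mod_eq_emod_of_pos (by omega : (0:Int) < 2*h-1)]; norm_num,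
       show (0:Int) + 1 = 1 from by norm_num]
  · by_cases hh1 : h = 1
    · subst hh1; decide
    · -- h ≤ 0 : the deck is empty, the first pass is vacuously ok, both sides are 1
      unfold fCore fAltCore
      rw [if_pos (by omega)]
      rw [show (2*h).toNat = 0 from by omega]
      rw [fLoop]
      unfold fStep
      rw [PySem.List.pyRange_one_eq_nil (by omega)]
      simp

-- ===== VERDICT (by name: the statement is the Claim_ definition above) =====
theorem f_spec : Claim_equal_f := by
  intro n _
  unfold Spec_f f f_alt
  exact core_eq _
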